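-- pv_equiv track=rewrite | github.com/ZBNomek/Python_ProgramProblems | 8_Matrices/H_56.py | crear_matriz_signos
-- ===== SOURCE A (Python) =====
-- def crear_matriz_signos(matriz_A):
--     matriz_signos = []
--     flag = False
--     n: int
--     for i in matriz_A:
--         temp = []
--         if flag == False:
--             n = 1
--         elif flag == True:
--             n = -1
--
--         if n == 1:
--             flag = True
--         else:
--             flag = False
--         for i in matriz_A:
--             temp.append(n)
--             if n == 1:
--                 n = -1
--             else:
--                 n = 1
--         matriz_signos.append(temp)
--     return matriz_signos
-- ===== SOURCE B (Python) =====
-- def crear_matriz_signos(matriz_A):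
--     n = len(matriz_A)
--     return [[1 if (i + j) % 2 == 0 else -1 for j in range(n)] for i in range(n)]
-- ===== Notes on version B (the rewrite author's own statement) =====
-- stated objective: simpler
-- what changed: Replaces the two running toggle states (flag and n) and stateful append loops with a stateless nested comprehension using the parity formula (i+j) % 2.
import Mathlib
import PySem

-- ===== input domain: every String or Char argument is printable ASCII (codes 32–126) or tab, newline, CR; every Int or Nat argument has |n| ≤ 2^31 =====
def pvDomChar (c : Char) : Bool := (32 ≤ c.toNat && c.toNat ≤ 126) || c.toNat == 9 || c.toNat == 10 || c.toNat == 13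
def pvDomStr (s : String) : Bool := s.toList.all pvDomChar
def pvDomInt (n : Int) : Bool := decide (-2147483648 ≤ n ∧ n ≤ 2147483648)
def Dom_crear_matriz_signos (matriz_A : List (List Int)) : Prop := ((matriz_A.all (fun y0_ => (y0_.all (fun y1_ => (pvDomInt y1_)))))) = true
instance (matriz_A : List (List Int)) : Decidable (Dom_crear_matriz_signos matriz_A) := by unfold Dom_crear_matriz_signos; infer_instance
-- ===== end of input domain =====

-- B replaces A's two running toggle states (flag, n) by a stateless parity formula (i+j) % 2: simpler.


-- ===== PORT A =====
-- literal transliteration: outer loop over matriz_A carrying (matriz_signos, flag);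
-- each iteration computes n from flag, updates flag, then the inner loop over matriz_A
-- appends the toggling n into temp.
def crear_matriz_signos (matriz_A : List (List Int)) : List (List Int) :=
  (matriz_A.foldl
    (fun (st : List (List Int) × Bool) (_ : List Int) =>
      let n : Int := if st.2 = false then 1 else -1
      let flag : Bool := if n = 1 then true else false
      let inner : List Int × Int :=
        matriz_A.foldl
          (fun (tst : List Int × Int) (_ : List Int) =>
            (tst.1 ++ [tst.2], if tst.2 = 1 then -1 else 1))
          ([], n)
      (st.1 ++ [inner.1], flag))
    ([], false)).1

-- ===== PORT B =====
-- literal transliteration of Source B: n = len(matriz_A); nested comprehension over range(n).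
def crear_matriz_signos_alt (matriz_A : List (List Int)) : List (List Int) :=
  let n := matriz_A.length
  (List.range n).map (fun i =>
    (List.range n).map (fun j => if (i + j) % 2 = 0 then (1 : Int) else -1))

-- ===== PRECONDITION & SPEC =====
def Spec_crear_matriz_signos (matriz_A : List (List Int)) (out : List (List Int)) : Prop := out = crear_matriz_signos_alt matriz_A
instance (matriz_A : List (List Int)) (out : List (List Int)) : Decidable (Spec_crear_matriz_signos matriz_A out) := by unfold Spec_crear_matriz_signos; infer_instance

-- ===== CLAIM (what is proved, stated in full; the proofs are below) =====
def Claim_equal_crear_matriz_signos : Prop := ∀ (matriz_A : List (List Int)), Dom_crear_matriz_signos matriz_A → Spec_crear_matriz_signos matriz_A (crear_matriz_signos matriz_A)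

-- ===== LEMMAS AND PROOFS =====

-- sign of position k on the checkerboard
def pvSgn (k : Nat) : Int := if k % 2 = 0 then 1 else -1

lemma pvSgn_toggle (k : Nat) : (if pvSgn k = 1 then (-1 : Int) else 1) = pvSgn (k + 1) := by
  rcases Nat.mod_two_eq_zero_or_one k with h | h <;>
    simp [pvSgn, h, Nat.add_mod]

lemma inner_eq (L : List (List Int)) : ∀ (acc : List Int) (k : Nat),
    (L.foldl (fun (tst : List Int × Int) (_ : List Int) =>
        (tst.1 ++ [tst.2], if tst.2 = 1 then -1 else 1)) (acc, pvSgn k)).1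
      = acc ++ (List.range L.length).map (fun j => pvSgn (k + j)) := by
  induction L with
  | nil => intro acc k; simp
  | cons h t ih =>
    intro acc k
    simp only [List.foldl_cons, List.length_cons, pvSgn_toggle, ih]
    rw [List.range_succ_eq_map]
    simp only [List.map_cons, List.map_map, Nat.add_zero, List.append_assoc,
      List.singleton_append]
    congr 1
    congr 1
    apply List.map_congr_left
    intro j _
    simp only [Function.comp_apply]
    congr 1
    omega

-- the row of signs starting at parity m
def pvRow (matriz_A : List (List Int)) (m : Nat) : List Int :=
  (List.range matriz_A.length).map (fun j => pvSgn (m + j))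

lemma pvFlag_step (k : Nat) :
    (if (if (decide (k % 2 = 1) : Bool) = false then (1:Int) else -1) = 1 then true else false)
      = decide ((k + 1) % 2 = 1) := by
  rcases Nat.mod_two_eq_zero_or_one k with h | h <;> simp [h, Nat.add_mod]

lemma pvSgn_of_flag (k : Nat) :
    (if (decide (k % 2 = 1) : Bool) = false then (1:Int) else -1) = pvSgn k := by
  rcases Nat.mod_two_eq_zero_or_one k with h | h <;> simp [pvSgn, h]

lemma outer_eq (matriz_A : List (List Int)) (L : List (List Int)) :
    ∀ (acc : List (List Int)) (k : Nat),
    (L.foldl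
      (fun (st : List (List Int) × Bool) (_ : List Int) =>
        let n : Int := if st.2 = false then 1 else -1
        let flag : Bool := if n = 1 then true else false
        let inner : List Int × Int :=
          matriz_A.foldl
            (fun (tst : List Int × Int) (_ : List Int) =>
              (tst.1 ++ [tst.2], if tst.2 = 1 then -1 else 1))
            ([], n)
        (st.1 ++ [inner.1], flag))
      (acc, decide (k % 2 = 1))).1
      = acc ++ (List.range L.length).map (fun i => pvRow matriz_A (k + i)) := by
  induction L with
  | nil => intro acc k; simp
  | cons h t ih =>
    intro acc k
    simp only [List.foldl_cons, List.length_cons]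
    rw [show (if (decide (k % 2 = 1) : Bool) = false then (1:Int) else -1) = pvSgn k from
          pvSgn_of_flag k] at *
    have hflag : (if pvSgn k = 1 then true else false) = decide ((k + 1) % 2 = 1) := by
      rw [← pvSgn_of_flag k]; exact pvFlag_step k
    rw [hflag, ih, inner_eq]
    rw [List.range_succ_eq_map]
    simp only [List.map_cons, List.map_map, Nat.add_zero, List.append_assoc,
      List.singleton_append]
    congr 1
    congr 1
    apply List.map_congr_left
    intro a _
    simp only [Function.comp_apply]
    have hab : k + 1 + a = k + Nat.succ a := by omega
    rw [hab]

-- ===== VERDICT (by name: the statement is the Claim_ definition above) =====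
theorem crear_matriz_signos_spec : Claim_equal_crear_matriz_signos := by
  intro matriz_A _
  unfold Spec_crear_matriz_signos crear_matriz_signos crear_matriz_signos_alt
  have h := outer_eq matriz_A matriz_A [] 0
  rw [show (false : Bool) = decide ((0 : Nat) % 2 = 1) by decide] at *
  rw [h]
  simp [pvRow, pvSgn]
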